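-- pv_equiv track=rewrite | github.com/GitMonsters/octotetrahedral-agi | arc-puzzle-catalog/re-arc/solves/07e86c70/solver.py | transform
-- ===== SOURCE A (Python) =====
-- def transform(grid):
--     H, W = len(grid), len(grid[0])
--     bg_count = sum(1 for r in grid for v in r if v == 5)
--     non_bg_count = H * W - bg_count
--     M = bg_count
--     OH, OW = M * H, M * W
--     out = [[5] * OW for _ in range(OH)]
--     placed = 0
--     for br in range(M - 1, -1, -1):
--         for bc in range(M):
--             if placed >= non_bg_count:
--                 break
--             for r in range(H):
--                 for c in range(W):
--                     out[br * H + r][bc * W + c] = grid[r][c]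
--             placed += 1
--         if placed >= non_bg_count:
--             break
--     return out
-- ===== SOURCE B (Python) =====
-- def transform(grid):
--     H, W = len(grid), len(grid[0])
--     M = sum(row.count(5) for row in grid)
--     filled = min(max(H * W - M, 0), M * M)
--     q, rem = divmod(filled, M) if M else (0, 0)
--     out = []
--     for br in range(M):
--         for r in range(H):
--             row = grid[r][:W]
--             if br >= M - q:
--                 out.append(row * M)
--             elif br == M - q - 1:
--                 out.append(row * rem + [5] * ((M - rem) * W))
--             else:
--                 out.append([5] * (M * W))
--     return out
-- ===== Notes on version B (the rewrite author's own statement) =====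
-- stated objective: simpler
-- what changed: B classifies each of the M block-rows in closed form as full / partial / empty via q, rem = divmod(min(max(non_bg,0), M*M), M) and emits each output row by list repetition (row*M, row*rem + [5]*...), instead of A's allocate-an-all-5-matrix and paint blocks one by one with four nested loops, a placed counter and two break statements.
import Mathlib
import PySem

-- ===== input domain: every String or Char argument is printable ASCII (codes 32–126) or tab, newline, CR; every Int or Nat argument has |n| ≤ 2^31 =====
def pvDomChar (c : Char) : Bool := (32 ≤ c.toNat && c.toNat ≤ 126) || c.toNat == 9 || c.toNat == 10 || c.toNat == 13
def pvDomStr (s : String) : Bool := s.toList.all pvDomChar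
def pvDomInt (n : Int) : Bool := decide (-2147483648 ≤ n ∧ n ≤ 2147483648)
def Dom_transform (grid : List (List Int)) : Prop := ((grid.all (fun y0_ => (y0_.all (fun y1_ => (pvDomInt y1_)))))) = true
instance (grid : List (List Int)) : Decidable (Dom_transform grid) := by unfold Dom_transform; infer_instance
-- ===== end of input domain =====

-- B replaces A's mutate-an-all-5-matrix fill (nested block loops, placed counter, breaks) by a
-- divmod classification of each block-row as full / partial / empty and list repetition; objective: simpler.


-- ===== PORT A =====
-- sum(1 for r in grid for v in r if v == 5)
def pvCount5 (grid : List (List Int)) : Nat :=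
  grid.foldl (fun a row => row.foldl (fun a2 v => if v = 5 then a2 + 1 else a2) a) 0

-- the two innermost loops: for r in range(H): for c in range(W): out[br*H+r][bc*W+c] = grid[r][c]
def pvPaintBlock (grid : List (List Int)) (H W : Nat) (out : List (List Int)) (br bc : Nat) :
    List (List Int) :=
  (List.range H).foldl (fun o r =>
    (List.range W).foldl (fun o2 c =>
      o2.set (br * H + r) ((o2.getD (br * H + r) []).set (bc * W + c)
        ((grid.getD r []).getD c 0))) o) out

-- for bc in range(M): if placed >= non_bg_count: break; paint; placed += 1
def pvInner (grid : List (List Int)) (H W : Nat) (nonbg : Int) (br : Nat) :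
    List Nat → List (List Int) → Nat → (List (List Int)) × Nat
  | [], out, placed => (out, placed)
  | bc :: rest, out, placed =>
    if nonbg ≤ (placed : Int) then (out, placed)
    else pvInner grid H W nonbg br rest (pvPaintBlock grid H W out br bc) (placed + 1)

-- for br in range(M-1, -1, -1): …inner…; if placed >= non_bg_count: break
def pvOuter (grid : List (List Int)) (H W M : Nat) (nonbg : Int) :
    List Nat → List (List Int) → Nat → List (List Int)
  | [], out, _ => out
  | br :: rest, out, placed =>
    let s := pvInner grid H W nonbg br (List.range M) out placed
    if nonbg ≤ (s.2 : Int) then s.1 else pvOuter grid H W M nonbg rest s.1 s.2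

def transform (grid : List (List Int)) : List (List Int) :=
  let H := grid.length
  let W := (grid.headD []).length
  let bg := pvCount5 grid
  let nonbg : Int := (H * W : Int) - (bg : Int)
  let M := bg
  let out := List.replicate (M * H) (List.replicate (M * W) (5 : Int))
  pvOuter grid H W M nonbg ((List.range M).reverse) out 0

-- ===== PORT B =====
-- B: filled = min(max(H*W-M,0), M*M); q, rem = divmod(filled, M); block-row br is full when
-- br >= M-q, the single partial row (rem left blocks filled) is br == M-q-1, all others empty.
def transform_alt (grid : List (List Int)) : List (List Int) :=
  let H := grid.length
  let W := (grid.headD []).length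
  let M : Nat := grid.foldl (fun a row => a + PySem.List.count row 5) 0
  let filled : Nat := (min (max ((H * W : Int) - (M : Int)) 0) ((M * M : Nat) : Int)).toNat
  let q : Nat := if M = 0 then 0 else filled / M
  let rem : Nat := if M = 0 then 0 else filled % M
  (List.range M).flatMap (fun (br : Nat) =>
    (List.range H).map (fun (r : Nat) =>
      let row := PySem.List.slice (grid.getD r []) none (some (W : Int))   -- grid[r][:W]
      if (M : Int) - (q : Int) ≤ (br : Int) then
        (List.replicate M row).flatten                                     -- row * M
      else if (br : Int) = (M : Int) - (q : Int) - 1 then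
        (List.replicate rem row).flatten ++ List.replicate ((M - rem) * W) 5  -- row*rem + [5]*((M-rem)*W)
      else
        List.replicate (M * W) 5))

-- ===== PRECONDITION & SPEC =====
-- Pre_ excludes exactly the inputs where Python A raises IndexError: the empty grid (grid[0]),
-- and ragged grids with a row shorter than row 0 in the case where at least one block gets
-- painted (so that grid[r][c] is actually read for all c < W).
def Pre_transform (grid : List (List Int)) : Prop :=
  grid ≠ [] ∧
    ((∀ row ∈ grid, (grid.headD []).length ≤ row.length) ∨
      (grid.flatMap id).count 5 = 0 ∨
      grid.length * (grid.headD []).length ≤ (grid.flatMap id).count 5)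
instance (grid : List (List Int)) : Decidable (Pre_transform grid) := by
  unfold Pre_transform; infer_instance

def pvWitness_transform : List (List Int) := [[5, 1], [2, 3]]

def Spec_transform (grid : List (List Int)) (out : List (List Int)) : Prop := out = transform_alt grid
instance (grid : List (List Int)) (out : List (List Int)) : Decidable (Spec_transform grid out) := by
  unfold Spec_transform; infer_instance

-- ===== CLAIM (what is proved, stated in full; the proofs are below) =====
def Claim_equal_transform : Prop :=
  ∀ (grid : List (List Int)), Dom_transform grid → Pre_transform grid →
    Spec_transform grid (transform grid)

-- ===== LEMMAS AND PROOFS =====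

-- proof-side abstraction: an output matrix as a function of its indices
def mkOut (m n : Nat) (f : Nat → Nat → Int) : List (List Int) :=
  (List.range m).map (fun i => (List.range n).map (f i))

def pvVal (grid : List (List Int)) (H W a b : Nat) : Int :=
  (grid.getD (a % H) []).getD (b % W) 0

-- state of the output after the first p blocks (in A's bottom-up, left-to-right rank order) are painted
def pvF (grid : List (List Int)) (H W M p : Nat) : Nat → Nat → Int :=
  fun a b => if (M - 1 - a / H) * M + b / W < p then pvVal grid H W a b else 5

theorem mkOut_congr {m n : Nat} {f g : Nat → Nat → Int}
    (h : ∀ a < m, ∀ b < n, f a b = g a b) : mkOut m n f = mkOut m n g := by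
  unfold mkOut
  apply List.map_congr_left
  intro a ha
  rw [List.mem_range] at ha
  apply List.map_congr_left
  intro b hb
  rw [List.mem_range] at hb
  exact h a ha b hb

theorem getD_mkOut {m n : Nat} {f : Nat → Nat → Int} {i : Nat} (h : i < m) :
    (mkOut m n f).getD i [] = (List.range n).map (f i) := by
  unfold mkOut
  rw [List.getD_eq_getElem _ _ (by simpa using h)]
  simp

theorem set_row {n : Nat} (g : Nat → Int) (j : Nat) (v : Int) :
    ((List.range n).map g).set j v
      = (List.range n).map (fun b => if b = j then v else g b) := by
  apply List.ext_getElem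
  · simp
  intro b h1 h2
  simp only [List.getElem_set, List.getElem_map, List.getElem_range]
  by_cases h : j = b
  · subst h
    simp
  · rw [if_neg h, if_neg (fun hh => h hh.symm)]

theorem set_mkOut {m n : Nat} {f : Nat → Nat → Int} {i j : Nat} {v : Int} (hi : i < m) :
    (mkOut m n f).set i (((mkOut m n f).getD i []).set j v)
      = mkOut m n (fun a b => if a = i ∧ b = j then v else f a b) := by
  rw [getD_mkOut hi, set_row]
  unfold mkOut
  apply List.ext_getElem
  · simp
  intro a h1 h2
  simp only [List.getElem_set, List.getElem_map, List.getElem_range]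
  by_cases h : i = a
  · subst h
    rw [if_pos rfl]
    apply List.map_congr_left
    intro b _
    by_cases hb2 : b = j
    · subst hb2
      rw [if_pos rfl, if_pos ⟨rfl, rfl⟩]
    · rw [if_neg hb2, if_neg (fun hh => hb2 hh.2)]
  · rw [if_neg h]
    apply List.map_congr_left
    intro b _
    rw [if_neg (fun hh => h hh.1.symm)]

theorem paint_row (grid : List (List Int)) {m n : Nat} (W : Nat) (f : Nat → Nat → Int)
    (i0 bc r : Nat) (hi : i0 < m) :
    ∀ k : Nat,
      (List.range k).foldl (fun o2 c =>
          o2.set i0 ((o2.getD i0 []).set (bc * W + c) ((grid.getD r []).getD c 0))) (mkOut m n f)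
        = mkOut m n (fun a b =>
            if a = i0 ∧ bc * W ≤ b ∧ b < bc * W + k then (grid.getD r []).getD (b - bc * W) 0
            else f a b) := by
  intro k
  induction k with
  | zero =>
    simp only [List.range_zero, List.foldl_nil]
    apply mkOut_congr
    intro a _ b _
    rw [if_neg (by omega)]
  | succ k ih =>
    rw [List.range_succ, List.foldl_append, List.foldl_cons, List.foldl_nil, ih, set_mkOut hi]
    apply mkOut_congr
    intro a _ b _
    by_cases hc : a = i0 ∧ b = bc * W + k
    · rw [if_pos hc, if_pos (by omega)]
      have hb : b - bc * W = k := by omega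
      rw [hb]
    · rw [if_neg hc]
      by_cases hc2 : a = i0 ∧ bc * W ≤ b ∧ b < bc * W + k
      · rw [if_pos hc2, if_pos (by omega)]
      · rw [if_neg hc2, if_neg (by omega)]

theorem paint_rows (grid : List (List Int)) {m n : Nat} (H W : Nat) (f : Nat → Nat → Int)
    (br bc : Nat) :
    ∀ k : Nat, br * H + k ≤ m →
      (List.range k).foldl (fun o r =>
          (List.range W).foldl (fun o2 c =>
            o2.set (br * H + r) ((o2.getD (br * H + r) []).set (bc * W + c)
              ((grid.getD r []).getD c 0))) o) (mkOut m n f)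
        = mkOut m n (fun a b =>
            if br * H ≤ a ∧ a < br * H + k ∧ bc * W ≤ b ∧ b < bc * W + W
            then (grid.getD (a - br * H) []).getD (b - bc * W) 0 else f a b) := by
  intro k
  induction k with
  | zero =>
    intro _
    simp only [List.range_zero, List.foldl_nil]
    apply mkOut_congr
    intro a _ b _
    rw [if_neg (by omega)]
  | succ k ih =>
    intro hk
    rw [List.range_succ, List.foldl_append, List.foldl_cons, List.foldl_nil,
      ih (by omega), paint_row grid W _ _ bc k (by omega)]
    apply mkOut_congr
    intro a _ b _
    by_cases hc : a = br * H + k ∧ bc * W ≤ b ∧ b < bc * W + W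
    · rw [if_pos hc, if_pos (by omega)]
      have ha : a - br * H = k := by omega
      rw [ha]
    · rw [if_neg hc]
      by_cases hc2 : br * H ≤ a ∧ a < br * H + k ∧ bc * W ≤ b ∧ b < bc * W + W
      · rw [if_pos hc2, if_pos (by omega)]
      · rw [if_neg hc2, if_neg (by omega)]

theorem paint_block_eq (grid : List (List Int)) {m : Nat} (H W : Nat) (f : Nat → Nat → Int)
    {n : Nat} (br bc : Nat) (hm : br * H + H ≤ m) :
    pvPaintBlock grid H W (mkOut m n f) br bc
      = mkOut m n (fun a b =>
          if br * H ≤ a ∧ a < br * H + H ∧ bc * W ≤ b ∧ b < bc * W + W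
          then (grid.getD (a - br * H) []).getD (b - bc * W) 0 else f a b) := by
  unfold pvPaintBlock
  exact paint_rows grid H W f br bc H hm

theorem rank_inj {M x y br bc : Nat} (hx : x < M) (hy : y < M) (hbr : br < M) (hbc : bc < M)
    (h : (M - 1 - x) * M + y = (M - 1 - br) * M + bc) : x = br ∧ y = bc := by
  have hM : 0 < M := by omega
  have hu : M - 1 - x = ((M - 1 - x) * M + y) / M := by
    rw [Nat.mul_comm, Nat.mul_add_div hM, Nat.div_eq_of_lt hy, Nat.add_zero]
  have hv : M - 1 - br = ((M - 1 - br) * M + bc) / M := by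
    rw [Nat.mul_comm, Nat.mul_add_div hM, Nat.div_eq_of_lt hbc, Nat.add_zero]
  have huv : M - 1 - x = M - 1 - br := by rw [hu, h, ← hv]
  have hx2 : x = br := by omega
  refine ⟨hx2, ?_⟩
  rw [hx2] at h
  omega

theorem block_range_div {H a br : Nat} (h : br * H ≤ a ∧ a < br * H + H) : a / H = br := by
  refine Nat.div_eq_of_lt_le h.1 ?_
  rw [Nat.succ_mul]
  omega

theorem div_block_range {H a br : Nat} (hH : 0 < H) (h : a / H = br) :
    br * H ≤ a ∧ a < br * H + H := by
  subst h
  have h1 := Nat.mod_add_div' a H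
  have h2 := Nat.mod_lt a hH
  omega

-- painting block (br, bc) of rank p advances pvF p to pvF (p+1)
theorem F_step (grid : List (List Int)) (H W M : Nat) {br bc p : Nat}
    (hbr : br < M) (hbc : bc < M) (hp : p = (M - 1 - br) * M + bc) :
    mkOut (M * H) (M * W) (fun a b =>
        if br * H ≤ a ∧ a < br * H + H ∧ bc * W ≤ b ∧ b < bc * W + W
        then (grid.getD (a - br * H) []).getD (b - bc * W) 0 else pvF grid H W M p a b)
      = mkOut (M * H) (M * W) (pvF grid H W M (p + 1)) := by
  apply mkOut_congr
  intro a ha b hb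
  have hH : 0 < H := by by_contra h; simp [Nat.le_zero.mp (Nat.not_lt.mp h)] at ha
  have hW : 0 < W := by by_contra h; simp [Nat.le_zero.mp (Nat.not_lt.mp h)] at hb
  have haM : a / H < M := (Nat.div_lt_iff_lt_mul hH).mpr (by omega)
  have hbM : b / W < M := (Nat.div_lt_iff_lt_mul hW).mpr (by omega)
  unfold pvF
  by_cases hc : a / H = br ∧ b / W = bc
  · have h1 := div_block_range hH hc.1
    have h2 := div_block_range hW hc.2
    rw [if_pos ⟨h1.1, h1.2, h2.1, h2.2⟩, if_pos (by rw [hc.1, hc.2]; omega)]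
    have e1 : a - br * H = a % H := by
      have h5 := Nat.mod_add_div' a H
      rw [hc.1] at h5
      omega
    have e2 : b - bc * W = b % W := by
      have h5 := Nat.mod_add_div' b W
      rw [hc.2] at h5
      omega
    rw [e1, e2]
    rfl
  · have hrect : ¬ (br * H ≤ a ∧ a < br * H + H ∧ bc * W ≤ b ∧ b < bc * W + W) := by
      intro hr
      exact hc ⟨block_range_div ⟨hr.1, hr.2.1⟩, block_range_div ⟨hr.2.2.1, hr.2.2.2⟩⟩
    rw [if_neg hrect]
    by_cases hlt : (M - 1 - a / H) * M + b / W < p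
    · rw [if_pos hlt, if_pos (Nat.lt_succ_of_lt hlt)]
    · have hne : ¬ ((M - 1 - a / H) * M + b / W < p + 1) := by
        intro hlt2
        have heq : (M - 1 - a / H) * M + b / W = p := by omega
        rw [hp] at heq
        exact hc ⟨(rank_inj haM hbM hbr hbc heq).1, (rank_inj haM hbM hbr hbc heq).2⟩
      rw [if_neg hlt, if_neg hne]

theorem inner_lemma (grid : List (List Int)) (H W M : Nat) (nonbg : Int) (N : Nat)
    (hNq : ∀ q : Nat, (nonbg ≤ (q : Int)) ↔ N ≤ q) (br : Nat) (hbr : br < M) :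
    ∀ (k bc0 p : Nat), bc0 + k ≤ M → p = (M - 1 - br) * M + bc0 →
      pvInner grid H W nonbg br (List.range' bc0 k)
          (mkOut (M * H) (M * W) (pvF grid H W M p)) p
        = (mkOut (M * H) (M * W) (pvF grid H W M (max p (min N (p + k)))),
            max p (min N (p + k))) := by
  intro k
  induction k with
  | zero =>
    intro bc0 p _ _
    have h : max p (min N (p + 0)) = p := by omega
    rw [h]
    rfl
  | succ k ih =>
    intro bc0 p hk hp
    rw [List.range'_succ]
    show pvInner grid H W nonbg br (bc0 :: List.range' (bc0 + 1) k) _ p = _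
    by_cases hb : nonbg ≤ (p : Int)
    · rw [pvInner, if_pos hb]
      have hN : N ≤ p := (hNq p).mp hb
      have h : max p (min N (p + (k + 1))) = p := by omega
      rw [h]
    · rw [pvInner, if_neg hb]
      have hNp : p < N := by have := (hNq p).not; omega
      have hbrm : br * H + H ≤ M * H := by
        have : (br + 1) * H ≤ M * H := Nat.mul_le_mul_right _ (by omega)
        rw [Nat.succ_mul] at this
        exact this
      rw [paint_block_eq grid H W _ br bc0 hbrm, F_step grid H W M hbr (by omega) hp,
        ih (bc0 + 1) (p + 1) (by omega) (by omega)]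
      have h : max (p + 1) (min N (p + 1 + k)) = max p (min N (p + (k + 1))) := by omega
      rw [h]

theorem outer_lemma (grid : List (List Int)) (H W M : Nat) (nonbg : Int) (N : Nat)
    (hNq : ∀ q : Nat, (nonbg ≤ (q : Int)) ↔ N ≤ q) :
    ∀ (k p : Nat), k ≤ M → p = (M - k) * M →
      pvOuter grid H W M nonbg ((List.range k).reverse)
          (mkOut (M * H) (M * W) (pvF grid H W M p)) p
        = mkOut (M * H) (M * W) (pvF grid H W M (max p (min N (M * M)))) := by
  intro k
  induction k with
  | zero =>
    intro p _ hp
    rw [Nat.sub_zero] at hp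
    have h : max p (min N (M * M)) = p := by omega
    rw [h]
    rfl
  | succ k ih =>
    intro p hk hp
    have hbr : k < M := by omega
    have hpM : p + M = (M - k) * M := by
      have h1 : M - k = (M - (k + 1)) + 1 := by omega
      rw [h1, Nat.succ_mul, hp]
    have hle : (M - k) * M ≤ M * M := Nat.mul_le_mul_right _ (Nat.sub_le M k)
    have hp' : p = (M - 1 - k) * M + 0 := by
      have h1 : M - (k + 1) = M - 1 - k := by omega
      rw [hp, h1, Nat.add_zero]
    rw [List.range_succ, List.reverse_append]
    show pvOuter grid H W M nonbg (k :: (List.range k).reverse) _ p = _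
    rw [pvOuter]
    rw [List.range_eq_range']
    rw [inner_lemma grid H W M nonbg N hNq k hbr M 0 p (by omega) hp']
    by_cases hb : nonbg ≤ ((max p (min N (p + M)) : Nat) : Int)
    · simp only [if_pos hb]
      have hN : N ≤ max p (min N (p + M)) := (hNq _).mp hb
      have h : max p (min N (p + M)) = max p (min N (M * M)) := by omega
      rw [h]
    · simp only [if_neg hb]
      have hN : ¬ N ≤ max p (min N (p + M)) := fun h => hb ((hNq _).mpr h)
      have h2 : max p (min N (p + M)) = p + M := by omega
      rw [h2, ih (p + M) (by omega) hpM]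
      have h3 : max (p + M) (min N (M * M)) = max p (min N (M * M)) := by omega
      rw [h3]

theorem init_out (grid : List (List Int)) (H W M : Nat) :
    List.replicate (M * H) (List.replicate (M * W) (5 : Int))
      = mkOut (M * H) (M * W) (pvF grid H W M 0) := by
  unfold mkOut pvF
  apply List.ext_getElem
  · simp
  intro a h1 h2
  simp only [List.getElem_replicate, List.getElem_map, List.getElem_range]
  apply List.ext_getElem
  · simp
  intro b h3 h4
  simp

-- A's program computes mkOut (pvF …) at the capped fill count
theorem A_side (grid : List (List Int)) :
    transform grid
      = mkOut (pvCount5 grid * grid.length) (pvCount5 grid * (grid.headD []).length)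
          (pvF grid grid.length (grid.headD []).length (pvCount5 grid)
            (min (((grid.length * (grid.headD []).length : Int) - (pvCount5 grid : Int)).toNat)
              (pvCount5 grid * pvCount5 grid))) := by
  simp only [transform]
  have hNq : ∀ q : Nat,
      (((grid.length * (grid.headD []).length : Int) - (pvCount5 grid : Int)) ≤ (q : Int))
        ↔ ((grid.length * (grid.headD []).length : Int) - (pvCount5 grid : Int)).toNat ≤ q := by
    intro q; omega
  rw [init_out grid grid.length (grid.headD []).length (pvCount5 grid),
    outer_lemma grid grid.length (grid.headD []).length (pvCount5 grid) _ _ hNq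
      (pvCount5 grid) 0 (Nat.le_refl _) (by simp)]
  have hmax : max 0 (min (((grid.length * (grid.headD []).length : Int) - (pvCount5 grid : Int)).toNat)
      (pvCount5 grid * pvCount5 grid))
      = min (((grid.length * (grid.headD []).length : Int) - (pvCount5 grid : Int)).toNat)
        (pvCount5 grid * pvCount5 grid) := by omega
  rw [hmax]

-- counting bridges: pvCount5 = Σ row.count 5 = B's fold = the flat count in Pre_
theorem foldl_count5_row (row : List Int) : ∀ a : Nat,
    row.foldl (fun a2 v => if v = 5 then a2 + 1 else a2) a = a + row.count 5 := by
  induction row with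
  | nil => intro a; simp
  | cons v t ih =>
    intro a
    rw [List.foldl_cons]
    by_cases h : v = 5
    · rw [if_pos h, ih, List.count_cons]
      simp [h]
      omega
    · rw [if_neg h, ih, List.count_cons]
      simp [h]

theorem pvCount5_eq_sum (grid : List (List Int)) :
    ∀ a : Nat, grid.foldl (fun a row => row.foldl (fun a2 v => if v = 5 then a2 + 1 else a2) a) a
      = a + (grid.map (fun row => row.count 5)).sum := by
  induction grid with
  | nil => intro a; simp
  | cons row t ih =>
    intro a
    rw [List.foldl_cons, foldl_count5_row, ih, List.map_cons, List.sum_cons]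
    omega

theorem foldl_add_count (grid : List (List Int)) : ∀ a : Nat,
    grid.foldl (fun a row => a + row.count 5) a
      = a + (grid.map (fun row => row.count 5)).sum := by
  induction grid with
  | nil => intro a; simp
  | cons row t ih =>
    intro a
    rw [List.foldl_cons, ih, List.map_cons, List.sum_cons]
    omega

theorem alt_count_eq (grid : List (List Int)) :
    grid.foldl (fun a row => a + PySem.List.count row 5) 0 = pvCount5 grid := by
  unfold pvCount5
  simp only [PySem.List.count_eq]
  rw [foldl_add_count grid 0, pvCount5_eq_sum grid 0]

theorem flat_count_eq (grid : List (List Int)) :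
    (grid.flatMap id).count 5 = pvCount5 grid := by
  unfold pvCount5
  rw [pvCount5_eq_sum grid 0]
  induction grid with
  | nil => simp
  | cons row t ih =>
    rw [List.flatMap_cons, List.count_append, List.map_cons, List.sum_cons]
    simp only [id]
    omega

-- small list facts for the B side
theorem take_eq_map_range (l : List Int) (W : Nat) (h : W ≤ l.length) :
    l.take W = (List.range W).map (fun c => l.getD c 0) := by
  apply List.ext_getElem
  · simp; omega
  intro b h1 h2
  simp only [List.getElem_take, List.getElem_map, List.getElem_range]
  rw [List.getD_eq_getElem l 0 (by simp at h2; omega)]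

theorem map_range_const (n : Nat) (c : Int) :
    (List.range n).map (fun _ => c) = List.replicate n c := by
  apply List.ext_getElem
  · simp
  intro b h1 h2
  simp

theorem flatten_replicate_eq (L : List Int) :
    ∀ n : Nat, (List.replicate n L).flatten = (List.range n).flatMap (fun _ => L) := by
  intro n
  induction n with
  | zero => simp
  | succ k ih =>
    rw [List.replicate_succ', List.flatten_append, List.range_succ, List.flatMap_append, ih]
    simp

theorem flatMap_chunks {α : Type} (W : Nat) (g : Nat → α) (chunk : Nat → List α)
    (hchunk : ∀ bc, chunk bc = (List.range W).map (fun c => g (bc * W + c))) :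
    ∀ Mk : Nat, (List.range Mk).flatMap chunk = (List.range (Mk * W)).map g := by
  intro Mk
  induction Mk with
  | zero => simp
  | succ k ih =>
    rw [List.range_succ, List.flatMap_append, ih, Nat.succ_mul, List.range_add,
      List.map_append, List.map_map]
    simp [hchunk]

theorem flatMap_congr_mem {α β : Type} {l : List α} {f g : α → List β}
    (h : ∀ x ∈ l, f x = g x) : l.flatMap f = l.flatMap g := by
  simp only [List.flatMap_def]
  rw [List.map_congr_left h]

-- a run of identical grid-row chunks
theorem rep_row_eq (l : List Int) (W k : Nat) (hlen : W ≤ l.length) :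
    (List.replicate k (l.take W)).flatten
      = (List.range (k * W)).map (fun b => l.getD (b % W) 0) := by
  rw [flatten_replicate_eq, flatMap_chunks W (fun b => l.getD (b % W) 0)
    (fun _ => l.take W) ?_ k]
  intro bc
  rw [take_eq_map_range l W hlen]
  apply List.map_congr_left
  intro c hc
  rw [List.mem_range] at hc
  show l.getD c 0 = l.getD ((bc * W + c) % W) 0
  rw [Nat.mul_comm bc W, Nat.mul_add_mod, Nat.mod_eq_of_lt hc]

-- chunk the output rows by block-row
theorem map_range_mul {α : Type} (g : Nat → α) (H : Nat) :
    ∀ M : Nat, (List.range (M * H)).map g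
      = (List.range M).flatMap (fun br => (List.range H).map (fun r => g (br * H + r))) := by
  intro M
  induction M with
  | zero => simp
  | succ k ih =>
    rw [Nat.succ_mul, List.range_add, List.map_append, ih, List.range_succ,
      List.flatMap_append, List.map_map]
    simp [Function.comp]

-- the heart of the B side: one block-row's H output rows, by case (full / partial / empty)
theorem alt_eq_mkOut (grid : List (List Int)) (H W M Fl : Nat)
    (hFl : Fl ≤ M * M)
    (hok : (∀ r, r < H → W ≤ (grid.getD r []).length) ∨ Fl = 0) :
    (List.range M).flatMap (fun (br : Nat) =>
      (List.range H).map (fun (r : Nat) =>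
        if (M : Int) - ((if M = 0 then 0 else Fl / M : Nat) : Int) ≤ (br : Int) then
          (List.replicate M ((grid.getD r []).take W)).flatten
        else if (br : Int) = (M : Int) - ((if M = 0 then 0 else Fl / M : Nat) : Int) - 1 then
          (List.replicate (if M = 0 then 0 else Fl % M) ((grid.getD r []).take W)).flatten
            ++ List.replicate ((M - (if M = 0 then 0 else Fl % M)) * W) 5
        else
          List.replicate (M * W) 5))
      = mkOut (M * H) (M * W) (pvF grid H W M Fl) := by
  by_cases hM : M = 0
  · subst hM
    simp [mkOut]
  have hMpos : 0 < M := Nat.pos_of_ne_zero hM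
  simp only [if_neg hM]
  have hqrem : Fl / M * M + Fl % M = Fl := by
    rw [Nat.mul_comm]
    exact Nat.div_add_mod Fl M
  have hremlt : Fl % M < M := Nat.mod_lt _ hMpos
  have hqle : Fl / M ≤ M :=
    le_trans (Nat.div_le_div_right hFl) (le_of_eq (Nat.mul_div_cancel_left M hMpos))
  unfold mkOut
  rw [map_range_mul _ H M]
  apply flatMap_congr_mem
  intro br hbr
  rw [List.mem_range] at hbr
  apply List.map_congr_left
  intro r hr
  rw [List.mem_range] at hr
  have hHpos : 0 < H := by omega
  have hdivA : (br * H + r) / H = br := block_range_div ⟨Nat.le_add_right _ _, by omega⟩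
  have hmodA : (br * H + r) % H = r := by
    rw [Nat.mul_comm br H, Nat.mul_add_mod, Nat.mod_eq_of_lt hr]
  by_cases hfull : (M : Int) - ((Fl / M : Nat) : Int) ≤ (br : Int)
  · rw [if_pos hfull]
    have hq1 : 1 ≤ Fl / M := by omega
    have h8 : 1 * M ≤ Fl / M * M := Nat.mul_le_mul_right M hq1
    have hFlpos : 0 < Fl := by omega
    have hlen : W ≤ (grid.getD r []).length := (hok.resolve_right (by omega)) r hr
    rw [rep_row_eq _ _ _ hlen]
    apply List.map_congr_left
    intro b hb
    rw [List.mem_range] at hb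
    have hWpos : 0 < W := by
      rcases Nat.eq_zero_or_pos W with h0 | h0
      · rw [h0, Nat.mul_zero] at hb
        omega
      · exact h0
    have hbW : b / W < M := (Nat.div_lt_iff_lt_mul hWpos).mpr (by omega)
    have hmul : (M - 1 - br) * M ≤ (Fl / M - 1) * M := Nat.mul_le_mul_right _ (by omega)
    have h5 : (Fl / M - 1) * M = Fl / M * M - M := Nat.sub_one_mul _ _
    have hcond : (M - 1 - (br * H + r) / H) * M + b / W < Fl := by
      rw [hdivA]
      omega
    show (grid.getD r []).getD (b % W) 0 = pvF grid H W M Fl (br * H + r) b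
    unfold pvF pvVal
    rw [if_pos hcond, hmodA]
  · rw [if_neg hfull]
    have hbrq : br < M - Fl / M := by omega
    have hqM : Fl / M < M := by omega
    by_cases hpar : (br : Int) = (M : Int) - ((Fl / M : Nat) : Int) - 1
    · rw [if_pos hpar]
      have hMbr : M - 1 - br = Fl / M := by omega
      have hsplit : M * W = (Fl % M) * W + (M - Fl % M) * W := by
        rw [← Nat.add_mul]
        congr 1
        omega
      rw [hsplit, List.range_add, List.map_append]
      congr 1
      · -- filled prefix of the partial block-row
        by_cases hrem0 : Fl % M = 0
        · rw [hrem0]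
          simp
        have hFlpos : 0 < Fl := by omega
        have hlen : W ≤ (grid.getD r []).length := (hok.resolve_right (by omega)) r hr
        rw [rep_row_eq _ _ _ hlen]
        apply List.map_congr_left
        intro b hb
        rw [List.mem_range] at hb
        have hWpos : 0 < W := by
          rcases Nat.eq_zero_or_pos W with h0 | h0
          · rw [h0, Nat.mul_zero] at hb
            omega
          · exact h0
        have hbW : b / W < Fl % M := (Nat.div_lt_iff_lt_mul hWpos).mpr (by omega)
        have hcond : (M - 1 - (br * H + r) / H) * M + b / W < Fl := by
          rw [hdivA, hMbr]
          omega
        show (grid.getD r []).getD (b % W) 0 = pvF grid H W M Fl (br * H + r) b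
        unfold pvF pvVal
        rw [if_pos hcond, hmodA]
      · -- all-5 suffix of the partial block-row
        rw [List.map_map, ← map_range_const ((M - Fl % M) * W) 5]
        apply List.map_congr_left
        intro x hx
        rw [List.mem_range] at hx
        have hWpos : 0 < W := by
          rcases Nat.eq_zero_or_pos W with h0 | h0
          · rw [h0, Nat.mul_zero] at hx
            omega
          · exact h0
        have hge : Fl % M ≤ (Fl % M * W + x) / W := by
          rw [Nat.mul_comm (Fl % M) W, Nat.mul_add_div hWpos]
          exact Nat.le_add_right _ _
        have hcond : ¬ ((M - 1 - (br * H + r) / H) * M + (Fl % M * W + x) / W < Fl) := by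
          rw [hdivA, hMbr]
          omega
        show (5 : Int) = pvF grid H W M Fl (br * H + r) (Fl % M * W + x)
        unfold pvF
        rw [if_neg hcond]
    · rw [if_neg hpar]
      have hge : Fl / M + 1 ≤ M - 1 - br := by omega
      have hmul : (Fl / M + 1) * M ≤ (M - 1 - br) * M := Nat.mul_le_mul_right _ hge
      have h5 : (Fl / M + 1) * M = Fl / M * M + M := Nat.succ_mul _ M
      rw [← map_range_const (M * W) 5]
      apply List.map_congr_left
      intro b hb
      rw [List.mem_range] at hb
      have hcond : ¬ ((M - 1 - (br * H + r) / H) * M + b / W < Fl) := by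
        rw [hdivA]
        generalize b / W = t
        omega
      show (5 : Int) = pvF grid H W M Fl (br * H + r) b
      unfold pvF
      rw [if_neg hcond]

-- B's program computes the same mkOut
theorem B_side (grid : List (List Int))
    (hok : (∀ r, r < grid.length → (grid.headD []).length ≤ (grid.getD r []).length) ∨
      min (((grid.length * (grid.headD []).length : Int) - (pvCount5 grid : Int)).toNat)
        (pvCount5 grid * pvCount5 grid) = 0) :
    transform_alt grid
      = mkOut (pvCount5 grid * grid.length) (pvCount5 grid * (grid.headD []).length)
          (pvF grid grid.length (grid.headD []).length (pvCount5 grid)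
            (min (((grid.length * (grid.headD []).length : Int) - (pvCount5 grid : Int)).toNat)
              (pvCount5 grid * pvCount5 grid))) := by
  unfold transform_alt
  simp only [PySem.List.slice_to_natCast, alt_count_eq]
  have hfe : (min (max ((grid.length * (grid.headD []).length : Int) - (pvCount5 grid : Int)) 0)
      ((pvCount5 grid * pvCount5 grid : Nat) : Int)).toNat
      = min (((grid.length * (grid.headD []).length : Int) - (pvCount5 grid : Int)).toNat)
        (pvCount5 grid * pvCount5 grid) := by
    rcases le_total ((grid.length * (grid.headD []).length : Int) - (pvCount5 grid : Int)) 0 with h | h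
    · rw [max_eq_right h, min_eq_left (by positivity), Int.toNat_of_nonpos h]
      simp
    · rw [max_eq_left h]
      rcases le_total ((grid.length * (grid.headD []).length : Int) - (pvCount5 grid : Int))
          ((pvCount5 grid * pvCount5 grid : Nat) : Int) with h2 | h2
      · rw [min_eq_left h2, Nat.min_eq_left (by omega)]
      · rw [min_eq_right h2, Nat.min_eq_right (by omega)]
        rw [Int.toNat_natCast]
  rw [hfe]
  exact alt_eq_mkOut grid grid.length (grid.headD []).length (pvCount5 grid) _
    (Nat.min_le_right _ _) hok

theorem transform_main (grid : List (List Int)) (hpre : Pre_transform grid) :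
    transform grid = transform_alt grid := by
  have hok : (∀ r, r < grid.length → (grid.headD []).length ≤ (grid.getD r []).length) ∨
      min (((grid.length * (grid.headD []).length : Int) - (pvCount5 grid : Int)).toNat)
        (pvCount5 grid * pvCount5 grid) = 0 := by
    rcases hpre.2 with h | h | h
    · left
      intro r hr
      have hm : grid.getD r [] ∈ grid := by
        rw [List.getD_eq_getElem grid [] hr]
        exact List.getElem_mem hr
      exact h _ hm
    · right
      rw [flat_count_eq] at h
      rw [h]
      simp
    · right
      rw [flat_count_eq] at h
      have hc : ((grid.length * (grid.headD []).length : Int) - (pvCount5 grid : Int)) ≤ 0 := by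
        have h2 : ((grid.length * (grid.headD []).length : Nat) : Int) ≤ (pvCount5 grid : Int) := by
          exact_mod_cast h
        push_cast at h2
        omega
      rw [Int.toNat_of_nonpos hc]
      simp
  rw [A_side grid, B_side grid hok]

-- ===== VERDICT (by name: the statement is the Claim_ definition above) =====
theorem transform_spec : Claim_equal_transform := by
  intro grid _ hpre
  unfold Spec_transform
  exact transform_main grid hpre
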